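-- pv_equiv track=rewrite | github.com/theonlymosmos/qrqr | app.py | get_locker_info
-- ===== SOURCE A (Python) =====
-- LOCKER_RANGES = [
--     ("A1", 40273, 40996, 1),
--     ("A2", 41001, 41488, 1),
--     ("A3", 41491, 41961, 1),
--     ("A4", 41973, 42338, 1),
--     ("A5", 42347, 42808, 1),
--     ("B1", 42809, 43099, 2),
--     ("B2", 43112, 43590, 2),
--     ("B3", 43592, 43954, 2),
--     ("B4", 43961, 44349, 2),
--     ("B5", 44351, 44897, 2),
--     ("C1", 44898, 45247, 3),
--     ("C2", 45254, 45528, 3),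
--     ("C3", 45533, 45716, 3),
--     ("C4", 45720, 45885, 3),
--     ("D2", 45994, 46089, 4),
--     ("D3", 46091, 46192, 4),
--     ("D4", 46194, 46274, 4),
--     ("D5", 61330, 61362, 4),
--     ("E1", 30005, 30242, 6),
--     ("E2", 30250, 30548, 6),
--     ("E3", 30559, 30781, 6),
--     ("E4", 30804, 30912, 6),
--     ("F1", 26001, 26157, 7),
--     ("F2", 26159, 26270, 7),
--     ("F4", 86089, 86217, 7),
--     ("F5", 84019, 84021, 7),
--     ("G1", 10109, 10366, 8),
--     ("G2", 28022, 28295, 8),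
--     ("G3", 28303, 28440, 8),
--     ("H1", 20002, 20206, 9),
--     ("H2", 20210, 20453, 9),
--     ("H3", 20457, 20662, 9),
--     ("H4", 20663, 20848, 9),
--     ("H5", 15528, 15643, 9),
--     ("I1", 55004, 55161, 10),
--     ("I2", 55165, 55287, 10),
--     ("I3", 55288, 55419, 10),
--     ("I4", 55421, 55513, 10),
--     ("I5", 55515, 55595, 10),
--     ("J1", 55599, 55681, 11),
--     ("J2", 55682, 55769, 11),
--     ("J3", 55770, 55850, 11),
--     ("J4", 55851, 55937, 11),
--     ("K1", 55938, 56021, 12),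
--     ("K2", 56022, 56082, 12),
--     ("K3", 56083, 56138, 12),
--     ("K4", 56139, 56186, 12),
--     ("K5", 56190, 56247, 12),
--     ("L1", 56248, 56305, 13),
--     ("L2", 56306, 56360, 13),
--     ("L3", 56361, 56415, 13),
--     ("L4", 56416, 56500, 13),
--     ("M1", 56501, 56590, 14),
--     ("M2", 56591, 56675, 14),
--     ("M3", 56676, 56780, 14),
--     ("M4", 56781, 56865, 14),
--     ("M5", 56866, 56948, 14),
--     ("N1", 56949, 57031, 15),
--     ("N2", 57032, 57114, 15),
--     ("N3", 57115, 57197, 15),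
--     ("N4", 57198, 57281, 15),
--     ("N5", 58197, 58237, 15),
--     ("O1", 24001, 24037, 17),
--     ("O2", 85017, 85074, 17),
--     ("O3", 87039, 87049, 17),
-- ]
--
-- def get_locker_info(code: str):
--     """Return locker group and number for the given employee code."""
--     try:
--         num = int(code)
--     except ValueError:
--         return None, None
--     for grp, start, end, locker in LOCKER_RANGES:
--         if start <= num <= end:
--             return grp, locker
--     return None, None
-- ===== SOURCE B (Python) =====
-- """Locker lookup by one bisect over a flattened half-open boundary table
-- instead of a linear scan over the range tuples.
--
-- _TABLE is the original LOCKER_RANGES data sorted by start, one packed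
-- "start:stop:group:locker" field per range with stop = end + 1 (half-open).
-- At import it is unpacked into a flat, non-decreasing boundary list
-- [start0, stop0, start1, stop1, ...] plus parallel group/locker columns,
-- so a lookup is a single bisect_right: the code falls inside a range
-- exactly when its insertion point is odd.
-- """
-- from bisect import bisect_right
--
-- _TABLE = (
--     "10109:10367:G1:8", "15528:15644:H5:9", "20002:20207:H1:9", "20210:20454:H2:9", "20457:20663:H3:9",
--     "20663:20849:H4:9", "24001:24038:O1:17", "26001:26158:F1:7", "26159:26271:F2:7", "28022:28296:G2:8",
--     "28303:28441:G3:8", "30005:30243:E1:6", "30250:30549:E2:6", "30559:30782:E3:6", "30804:30913:E4:6",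
--     "40273:40997:A1:1", "41001:41489:A2:1", "41491:41962:A3:1", "41973:42339:A4:1", "42347:42809:A5:1",
--     "42809:43100:B1:2", "43112:43591:B2:2", "43592:43955:B3:2", "43961:44350:B4:2", "44351:44898:B5:2",
--     "44898:45248:C1:3", "45254:45529:C2:3", "45533:45717:C3:3", "45720:45886:C4:3", "45994:46090:D2:4",
--     "46091:46193:D3:4", "46194:46275:D4:4", "55004:55162:I1:10", "55165:55288:I2:10", "55288:55420:I3:10",
--     "55421:55514:I4:10", "55515:55596:I5:10", "55599:55682:J1:11", "55682:55770:J2:11", "55770:55851:J3:11",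
--     "55851:55938:J4:11", "55938:56022:K1:12", "56022:56083:K2:12", "56083:56139:K3:12", "56139:56187:K4:12",
--     "56190:56248:K5:12", "56248:56306:L1:13", "56306:56361:L2:13", "56361:56416:L3:13", "56416:56501:L4:13",
--     "56501:56591:M1:14", "56591:56676:M2:14", "56676:56781:M3:14", "56781:56866:M4:14", "56866:56949:M5:14",
--     "56949:57032:N1:15", "57032:57115:N2:15", "57115:57198:N3:15", "57198:57282:N4:15", "58197:58238:N5:15",
--     "61330:61363:D5:4", "84019:84022:F5:7", "85017:85075:O2:17", "86089:86218:F4:7", "87039:87050:O3:17",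
-- )
--
-- _BOUNDS = []   # [start0, stop0, start1, stop1, ...], non-decreasing
-- _GROUPS = []
-- _LOCKERS = []
-- for _field in _TABLE:
--     _s, _t, _g, _l = _field.split(":")
--     _BOUNDS.append(int(_s))
--     _BOUNDS.append(int(_t))
--     _GROUPS.append(_g)
--     _LOCKERS.append(int(_l))
--
--
-- def get_locker_info(code: str):
--     """Return locker group and number for the given employee code."""
--     try:
--         num = int(code)
--     except ValueError:
--         return None, None
--     i = bisect_right(_BOUNDS, num)
--     if i % 2:
--         return _GROUPS[i // 2], _LOCKERS[i // 2]
--     return None, None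
-- ===== Notes on version B (the rewrite author's own statement) =====
-- stated objective: alternative
-- what changed: Replaces the linear scan over the range tuples with a module-level unpacking of the start-sorted table (packed colon-separated fields with an exclusive stop bound) into a flat non-decreasing boundary list plus parallel group and locker columns, so a lookup is a single bisect_right whose odd insertion point selects the containing range.
import Mathlib
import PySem

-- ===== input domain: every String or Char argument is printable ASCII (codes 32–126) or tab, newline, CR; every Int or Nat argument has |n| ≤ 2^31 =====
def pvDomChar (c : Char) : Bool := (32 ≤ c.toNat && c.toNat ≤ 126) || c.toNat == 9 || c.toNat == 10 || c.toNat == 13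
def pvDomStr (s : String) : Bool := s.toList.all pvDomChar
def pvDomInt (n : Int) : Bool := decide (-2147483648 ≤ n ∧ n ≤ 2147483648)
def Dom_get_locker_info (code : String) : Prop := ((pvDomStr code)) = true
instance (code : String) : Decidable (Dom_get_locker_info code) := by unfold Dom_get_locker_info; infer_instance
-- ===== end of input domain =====

set_option maxRecDepth 40000

-- B replaces A's linear scan of the range tuples by a module-level unpacking of the
-- start-sorted table into a flat half-open boundary list plus parallel group/locker
-- columns, looked up with one bisect_right (inside a range ⟺ odd insertion point).

-- ===== PORT A =====
def lockerRanges : List (String × Int × Int × Int) := [("A1", 40273, 40996, 1),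
  ("A2", 41001, 41488, 1),
  ("A3", 41491, 41961, 1),
  ("A4", 41973, 42338, 1),
  ("A5", 42347, 42808, 1),
  ("B1", 42809, 43099, 2),
  ("B2", 43112, 43590, 2),
  ("B3", 43592, 43954, 2),
  ("B4", 43961, 44349, 2),
  ("B5", 44351, 44897, 2),
  ("C1", 44898, 45247, 3),
  ("C2", 45254, 45528, 3),
  ("C3", 45533, 45716, 3),
  ("C4", 45720, 45885, 3),
  ("D2", 45994, 46089, 4),
  ("D3", 46091, 46192, 4),
  ("D4", 46194, 46274, 4),
  ("D5", 61330, 61362, 4),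
  ("E1", 30005, 30242, 6),
  ("E2", 30250, 30548, 6),
  ("E3", 30559, 30781, 6),
  ("E4", 30804, 30912, 6),
  ("F1", 26001, 26157, 7),
  ("F2", 26159, 26270, 7),
  ("F4", 86089, 86217, 7),
  ("F5", 84019, 84021, 7),
  ("G1", 10109, 10366, 8),
  ("G2", 28022, 28295, 8),
  ("G3", 28303, 28440, 8),
  ("H1", 20002, 20206, 9),
  ("H2", 20210, 20453, 9),
  ("H3", 20457, 20662, 9),
  ("H4", 20663, 20848, 9),
  ("H5", 15528, 15643, 9),
  ("I1", 55004, 55161, 10),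
  ("I2", 55165, 55287, 10),
  ("I3", 55288, 55419, 10),
  ("I4", 55421, 55513, 10),
  ("I5", 55515, 55595, 10),
  ("J1", 55599, 55681, 11),
  ("J2", 55682, 55769, 11),
  ("J3", 55770, 55850, 11),
  ("J4", 55851, 55937, 11),
  ("K1", 55938, 56021, 12),
  ("K2", 56022, 56082, 12),
  ("K3", 56083, 56138, 12),
  ("K4", 56139, 56186, 12),
  ("K5", 56190, 56247, 12),
  ("L1", 56248, 56305, 13),
  ("L2", 56306, 56360, 13),
  ("L3", 56361, 56415, 13),
  ("L4", 56416, 56500, 13),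
  ("M1", 56501, 56590, 14),
  ("M2", 56591, 56675, 14),
  ("M3", 56676, 56780, 14),
  ("M4", 56781, 56865, 14),
  ("M5", 56866, 56948, 14),
  ("N1", 56949, 57031, 15),
  ("N2", 57032, 57114, 15),
  ("N3", 57115, 57197, 15),
  ("N4", 57198, 57281, 15),
  ("N5", 58197, 58237, 15),
  ("O1", 24001, 24037, 17),
  ("O2", 85017, 85074, 17),
  ("O3", 87039, 87049, 17)]

-- the for-loop of A with its early return
def scanRanges : List (String × Int × Int × Int) → Int → Option String × Option Int
  | [], _ => (none, none)
  | (grp, start, stop, locker) :: rest, num =>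
    if start ≤ num ∧ num ≤ stop then (some grp, some locker) else scanRanges rest num

def get_locker_info (code : String) : Option String × Option Int :=
  match PySem.Int.ofStr? code with
  | none => (none, none)
  | some num => scanRanges lockerRanges num

-- ===== PORT B =====
-- Source B's _TABLE: the ranges sorted by start, one "start:stop:group:locker" field each (stop = end + 1)
def lockerTable : List String := ["10109:10367:G1:8",
  "15528:15644:H5:9",
  "20002:20207:H1:9",
  "20210:20454:H2:9",
  "20457:20663:H3:9",
  "20663:20849:H4:9",
  "24001:24038:O1:17",
  "26001:26158:F1:7",
  "26159:26271:F2:7",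
  "28022:28296:G2:8",
  "28303:28441:G3:8",
  "30005:30243:E1:6",
  "30250:30549:E2:6",
  "30559:30782:E3:6",
  "30804:30913:E4:6",
  "40273:40997:A1:1",
  "41001:41489:A2:1",
  "41491:41962:A3:1",
  "41973:42339:A4:1",
  "42347:42809:A5:1",
  "42809:43100:B1:2",
  "43112:43591:B2:2",
  "43592:43955:B3:2",
  "43961:44350:B4:2",
  "44351:44898:B5:2",
  "44898:45248:C1:3",
  "45254:45529:C2:3",
  "45533:45717:C3:3",
  "45720:45886:C4:3",
  "45994:46090:D2:4",
  "46091:46193:D3:4",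
  "46194:46275:D4:4",
  "55004:55162:I1:10",
  "55165:55288:I2:10",
  "55288:55420:I3:10",
  "55421:55514:I4:10",
  "55515:55596:I5:10",
  "55599:55682:J1:11",
  "55682:55770:J2:11",
  "55770:55851:J3:11",
  "55851:55938:J4:11",
  "55938:56022:K1:12",
  "56022:56083:K2:12",
  "56083:56139:K3:12",
  "56139:56187:K4:12",
  "56190:56248:K5:12",
  "56248:56306:L1:13",
  "56306:56361:L2:13",
  "56361:56416:L3:13",
  "56416:56501:L4:13",
  "56501:56591:M1:14",
  "56591:56676:M2:14",
  "56676:56781:M3:14",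
  "56781:56866:M4:14",
  "56866:56949:M5:14",
  "56949:57032:N1:15",
  "57032:57115:N2:15",
  "57115:57198:N3:15",
  "57198:57282:N4:15",
  "58197:58238:N5:15",
  "61330:61363:D5:4",
  "84019:84022:F5:7",
  "85017:85075:O2:17",
  "86089:86218:F4:7",
  "87039:87050:O3:17"]

-- Source B's module-level unpacking loop: _BOUNDS (flat [start, stop, ...]), _GROUPS, _LOCKERS
def lockerCols : List Int × List String × List Int :=
  lockerTable.foldl
    (fun acc field =>
      match PySem.Str.split? field ":" with
      | some [s, t, g, l] =>
          (acc.1 ++ [(PySem.Int.ofStr? s).getD 0, (PySem.Int.ofStr? t).getD 0],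
           acc.2.1 ++ [g],
           acc.2.2 ++ [(PySem.Int.ofStr? l).getD 0])
      | _ => acc)  -- unreachable: every _TABLE field has exactly four ':'-separated parts,
                   -- and its numeric parts are plain digit strings, so int() cannot raise
    ([], [], [])

def get_locker_info_alt (code : String) : Option String × Option Int :=
  match PySem.Int.ofStr? code with
  | none => (none, none)
  | some num =>
    let i := PySem.List.bisectRight lockerCols.1 num
    if i % 2 = 1 then
      -- _GROUPS[i // 2], _LOCKERS[i // 2]: i odd forces i / 2 < 65, so IndexError is impossible
      let j : Nat := i / 2
      match PySem.List.pyGet? lockerCols.2.1 (Int.ofNat j),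
            PySem.List.pyGet? lockerCols.2.2 (Int.ofNat j) with
      | some g, some l => (some g, some l)
      | _, _ => (none, none)
    else (none, none)

-- ===== PRECONDITION & SPEC =====
def Spec_get_locker_info (code : String) (out : Option String × Option Int) : Prop := out = get_locker_info_alt code
instance (code : String) (out : Option String × Option Int) : Decidable (Spec_get_locker_info code out) := by unfold Spec_get_locker_info; infer_instance

-- ===== CLAIM (what is proved, stated in full; the proofs are below) =====
def Claim_equal_get_locker_info : Prop := ∀ (code : String), Dom_get_locker_info code → Spec_get_locker_info code (get_locker_info code)

-- ===== LEMMAS AND PROOFS =====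

-- the ranges sorted by start, as a plain literal
def ssLit : List (String × Int × Int × Int) := [("G1", 10109, 10366, 8),
  ("H5", 15528, 15643, 9),
  ("H1", 20002, 20206, 9),
  ("H2", 20210, 20453, 9),
  ("H3", 20457, 20662, 9),
  ("H4", 20663, 20848, 9),
  ("O1", 24001, 24037, 17),
  ("F1", 26001, 26157, 7),
  ("F2", 26159, 26270, 7),
  ("G2", 28022, 28295, 8),
  ("G3", 28303, 28440, 8),
  ("E1", 30005, 30242, 6),
  ("E2", 30250, 30548, 6),
  ("E3", 30559, 30781, 6),
  ("E4", 30804, 30912, 6),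
  ("A1", 40273, 40996, 1),
  ("A2", 41001, 41488, 1),
  ("A3", 41491, 41961, 1),
  ("A4", 41973, 42338, 1),
  ("A5", 42347, 42808, 1),
  ("B1", 42809, 43099, 2),
  ("B2", 43112, 43590, 2),
  ("B3", 43592, 43954, 2),
  ("B4", 43961, 44349, 2),
  ("B5", 44351, 44897, 2),
  ("C1", 44898, 45247, 3),
  ("C2", 45254, 45528, 3),
  ("C3", 45533, 45716, 3),
  ("C4", 45720, 45885, 3),
  ("D2", 45994, 46089, 4),
  ("D3", 46091, 46192, 4),
  ("D4", 46194, 46274, 4),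
  ("I1", 55004, 55161, 10),
  ("I2", 55165, 55287, 10),
  ("I3", 55288, 55419, 10),
  ("I4", 55421, 55513, 10),
  ("I5", 55515, 55595, 10),
  ("J1", 55599, 55681, 11),
  ("J2", 55682, 55769, 11),
  ("J3", 55770, 55850, 11),
  ("J4", 55851, 55937, 11),
  ("K1", 55938, 56021, 12),
  ("K2", 56022, 56082, 12),
  ("K3", 56083, 56138, 12),
  ("K4", 56139, 56186, 12),
  ("K5", 56190, 56247, 12),
  ("L1", 56248, 56305, 13),
  ("L2", 56306, 56360, 13),
  ("L3", 56361, 56415, 13),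
  ("L4", 56416, 56500, 13),
  ("M1", 56501, 56590, 14),
  ("M2", 56591, 56675, 14),
  ("M3", 56676, 56780, 14),
  ("M4", 56781, 56865, 14),
  ("M5", 56866, 56948, 14),
  ("N1", 56949, 57031, 15),
  ("N2", 57032, 57114, 15),
  ("N3", 57115, 57197, 15),
  ("N4", 57198, 57281, 15),
  ("N5", 58197, 58237, 15),
  ("D5", 61330, 61362, 4),
  ("F5", 84019, 84021, 7),
  ("O2", 85017, 85074, 17),
  ("F4", 86089, 86217, 7),
  ("O3", 87039, 87049, 17)]

theorem colsBounds : lockerCols.1 = ssLit.flatMap (fun r => [r.2.1, r.2.2.1 + 1]) := by decide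

theorem colsGroups : lockerCols.2.1 = ssLit.map (fun r => r.1) := by decide

theorem colsLockers : lockerCols.2.2 = ssLit.map (fun r => r.2.2.2) := by decide

theorem perm_lockerRanges : lockerRanges.Perm ssLit := by decide

theorem ssLit_bounds : ∀ r ∈ ssLit, r.2.1 ≤ r.2.2.1 := by decide

theorem ssLit_disj : ssLit.Pairwise (fun a b => a.2.2.1 < b.2.1) := by decide

theorem ssLit_disj2 : ssLit.Pairwise (fun a b => a.2.2.1 < b.2.1 ∨ b.2.2.1 < a.2.1) := by decide

theorem flat_sorted : (ssLit.flatMap (fun r => [r.2.1, r.2.2.1 + 1])).Pairwise (· ≤ ·) := by decide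

-- A's scan when no range contains num
theorem scan_none (rs : List (String × Int × Int × Int)) (num : Int)
    (h : ∀ r ∈ rs, ¬ (r.2.1 ≤ num ∧ num ≤ r.2.2.1)) : scanRanges rs num = (none, none) := by
  induction rs with
  | nil => rfl
  | cons hd tl ih =>
    obtain ⟨g, s, e, l⟩ := hd
    simp only [scanRanges]
    rw [if_neg (h _ (List.mem_cons_self))]
    exact ih fun r hr => h r (List.mem_cons_of_mem _ hr)

-- A's scan when a unique range contains num
theorem scan_unique (rs : List (String × Int × Int × Int)) (num : Int)
    (r0 : String × Int × Int × Int) (hmem : r0 ∈ rs)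
    (hpred : r0.2.1 ≤ num ∧ num ≤ r0.2.2.1)
    (huniq : ∀ r ∈ rs, (r.2.1 ≤ num ∧ num ≤ r.2.2.1) → r = r0) :
    scanRanges rs num = (some r0.1, some r0.2.2.2) := by
  induction rs with
  | nil => cases hmem
  | cons hd tl ih =>
    obtain ⟨g, s, e, l⟩ := hd
    simp only [scanRanges]
    by_cases hc : s ≤ num ∧ num ≤ e
    · rw [if_pos hc]
      have := huniq (g, s, e, l) List.mem_cons_self hc
      rw [← this]
    · rw [if_neg hc]
      have hmem' : r0 ∈ tl := by
        rcases List.mem_cons.mp hmem with h | h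
        · rw [h] at hpred
          exact absurd (by simpa using hpred) hc
        · exact h
      exact ih hmem' fun r hr => huniq r (List.mem_cons_of_mem _ hr)

-- scan is invariant under this permutation, the ranges being pairwise disjoint
theorem scan_perm (num : Int) : scanRanges lockerRanges num = scanRanges ssLit num := by
  by_cases hex : ∃ r ∈ ssLit, r.2.1 ≤ num ∧ num ≤ r.2.2.1
  · obtain ⟨r0, hr0, hp0⟩ := hex
    have huniq : ∀ r ∈ ssLit, (r.2.1 ≤ num ∧ num ≤ r.2.2.1) → r = r0 := by
      intro r hr hp
      by_contra hne
      have hsym : Symmetric (fun (a b : String × Int × Int × Int) =>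
          a.2.2.1 < b.2.1 ∨ b.2.2.1 < a.2.1) := fun a b h => h.symm
      have hR := List.Pairwise.forall hsym ssLit_disj2 hr hr0 hne
      obtain ⟨hp1, hp2⟩ := hp
      obtain ⟨hq1, hq2⟩ := hp0
      rcases hR with h | h <;> omega
    rw [scan_unique ssLit num r0 hr0 hp0 huniq,
        scan_unique lockerRanges num r0 (perm_lockerRanges.mem_iff.mpr hr0) hp0
          (fun r hr => huniq r (perm_lockerRanges.mem_iff.mp hr))]
  · rw [scan_none ssLit num (fun r hr hp => hex ⟨r, hr, hp⟩),
        scan_none lockerRanges num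
          (fun r hr hp => hex ⟨r, perm_lockerRanges.mem_iff.mp hr, hp⟩)]

-- bisect_right on a sorted list counts the elements ≤ x
theorem bisect_eq_countP (xs : List Int) (x : Int) (hs : xs.Pairwise (· ≤ ·)) :
    PySem.List.bisectRight xs x = xs.countP (fun a => decide (a ≤ x)) := by
  obtain ⟨hk, h1, h2⟩ := PySem.List.bisectRight_spec xs x hs
  set k := PySem.List.bisectRight xs x with hkdef
  have hsplit : xs = xs.take k ++ xs.drop k := (List.take_append_drop k xs).symm
  have htake : (xs.take k).countP (fun a => decide (a ≤ x)) = k := by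
    have hall : ∀ a ∈ xs.take k, (fun a => decide (a ≤ x)) a = true := by
      intro a ha
      obtain ⟨i, hi, hget⟩ := List.mem_iff_getElem.mp ha
      have hik : i < k := lt_of_lt_of_le hi (by simp [List.length_take])
      have hilen : i < xs.length := lt_of_lt_of_le hik hk
      have hxa : xs[i] = a := by rw [← hget]; simp [List.getElem_take]
      simpa [← hxa] using h1 i hilen hik
    rw [List.countP_eq_length.mpr hall, List.length_take, min_eq_left hk]
  have hdrop : (xs.drop k).countP (fun a => decide (a ≤ x)) = 0 := by
    rw [List.countP_eq_zero]
    intro a ha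
    obtain ⟨i, hi, hget⟩ := List.mem_iff_getElem.mp ha
    have hlen : k + i < xs.length := by
      have h' := hi; simp [List.length_drop] at h'; omega
    have hxa : xs[k + i] = a := by rw [← hget]; simp [List.getElem_drop]
    have hx := h2 (k + i) hlen (Nat.le_add_right k i)
    simp only [decide_eq_true_eq, not_le]
    omega
  conv_rhs => rw [hsplit]
  rw [List.countP_append, htake, hdrop]
  omega

-- A's scan over a sorted disjoint list equals B's parity-of-insertion-point lookup
theorem scan_eq_parity (ss : List (String × Int × Int × Int)) (num : Int)
    (hb : ∀ r ∈ ss, r.2.1 ≤ r.2.2.1)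
    (hd : ss.Pairwise (fun a b => a.2.2.1 < b.2.1)) :
    scanRanges ss num =
      (let i := (ss.flatMap (fun r => [r.2.1, r.2.2.1 + 1])).countP (fun a => decide (a ≤ num));
       if i % 2 = 1 then
         match (ss.map (fun r => r.1))[i / 2]?, (ss.map (fun r => r.2.2.2))[i / 2]? with
         | some g, some l => (some g, some l)
         | _, _ => (none, none)
       else (none, none)) := by
  induction ss with
  | nil => rfl
  | cons hd' tl ih =>
    obtain ⟨g, s, e, l⟩ := hd'
    have hbtl : ∀ r ∈ tl, r.2.1 ≤ r.2.2.1 := fun r hr => hb r (List.mem_cons_of_mem _ hr)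
    have hdtl : tl.Pairwise (fun a b => a.2.2.1 < b.2.1) := hd.of_cons
    have hdis : ∀ r ∈ tl, e < r.2.1 := fun r hr => (List.pairwise_cons.mp hd).1 r hr
    have hbhd : s ≤ e := hb (g, s, e, l) List.mem_cons_self
    have hrest : ∀ x ∈ tl.flatMap (fun r => [r.2.1, r.2.2.1 + 1]), e < x := by
      intro x hx
      obtain ⟨r, hr, hxr⟩ := List.mem_flatMap.mp hx
      have h1 := hdis r hr
      have h2 := hbtl r hr
      have hx2 : x = r.2.1 ∨ x = r.2.2.1 + 1 := by simpa using hxr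
      rcases hx2 with h | h <;> omega
    by_cases hs : s ≤ num
    · by_cases he : num ≤ e
      · -- num inside the head range: both sides yield (some g, some l)
        have hct : (tl.flatMap (fun r => [r.2.1, r.2.2.1 + 1])).countP
            (fun a => decide (a ≤ num)) = 0 := by
          rw [List.countP_eq_zero]
          intro a ha
          have := hrest a ha
          simp only [decide_eq_true_eq, not_le]
          omega
        have hne : ¬ (e + 1 ≤ num) := by omega
        simp [scanRanges, hs, he, hne, hct]
      · -- num above the head range: step to the tail, index shifted by one
        have he' : e < num := by omega
        have h1 : e + 1 ≤ num := by omega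
        simp only [scanRanges, List.flatMap_cons, List.map_cons]
        rw [if_neg (by omega : ¬ (s ≤ num ∧ num ≤ e)), ih hbtl hdtl]
        simp only [List.countP_append, List.countP_cons, List.countP_nil,
          decide_eq_true_eq, if_pos hs, if_pos h1]
        set ct := (tl.flatMap (fun r => [r.2.1, r.2.2.1 + 1])).countP
            (fun a => decide (a ≤ num)) with hct
        have hmod : (0 + 1 + 1 + ct) % 2 = ct % 2 := by omega
        have hdiv : (0 + 1 + 1 + ct) / 2 = ct / 2 + 1 := by omega
        rw [hmod, hdiv, List.getElem?_cons_succ, List.getElem?_cons_succ]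
    · -- num below every range: both sides yield (none, none)
      have hlt : num < s := by omega
      have hct : (tl.flatMap (fun r => [r.2.1, r.2.2.1 + 1])).countP
          (fun a => decide (a ≤ num)) = 0 := by
        rw [List.countP_eq_zero]
        intro a ha
        have := hrest a ha
        simp only [decide_eq_true_eq, not_le]
        omega
      have hs' : ¬ (s ≤ num) := by omega
      have he' : ¬ (e + 1 ≤ num) := by omega
      rw [show scanRanges ((g, s, e, l) :: tl) num = scanRanges tl num by
            simp [scanRanges, hs'],
          scan_none tl num (by intro r hr hp; have := hdis r hr; omega)]
      simp [hct, hs', he']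

-- ===== VERDICT (by name: the statement is the Claim_ definition above) =====
theorem get_locker_info_spec : Claim_equal_get_locker_info := by
  intro code _
  unfold Spec_get_locker_info get_locker_info get_locker_info_alt
  cases hof : PySem.Int.ofStr? code with
  | none => rfl
  | some num =>
    dsimp only
    rw [scan_perm num, scan_eq_parity ssLit num ssLit_bounds ssLit_disj,
        colsBounds, colsGroups, colsLockers,
        bisect_eq_countP _ num flat_sorted]
    simp only [Int.ofNat_eq_natCast, PySem.List.pyGet?_natCast, List.getElem?_map]
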